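-- pv_equiv track=rewrite | github.com/aundreka/aundreka | generate_banner.py | fit_labels
-- ===== SOURCE A (Python) =====
-- def label_width(label: str) -> int:
--     return len(label) * 7 + 12
--
-- def fit_labels(labels: list[str], start_x: int, max_x: int, gap: int = 5) -> list[str]:
--     fitted = list(labels)
--     while fitted:
--         total_width = sum(label_width(label) for label in fitted) + gap * (len(fitted) - 1)
--         if start_x + total_width <= max_x:
--             return fitted
--         longest = max(fitted, key=lambda label: (len(label), label))
--         fitted.remove(longest)
--     return fitted
-- ===== SOURCE B (Python) =====
-- def fit_labels(labels: list[str], start_x: int, max_x: int, gap: int = 5) -> list[str]: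
--     # Sort (index, label) pairs by removal priority once, then drop labels
--     # incrementally (subtracting each width) until the remainder fits.
--     order = sorted(enumerate(labels), key=lambda p: (len(p[1]), p[1]), reverse=True)
--     total = sum(len(l) * 7 + 12 for l in labels) + gap * (len(labels) - 1)
--     dropped = set()
--     for i, l in order:
--         if start_x + total <= max_x:
--             break
--         dropped.add(i)
--         total -= len(l) * 7 + 12 + gap
--     return [l for i, l in enumerate(labels) if i not in dropped]
-- ===== Notes on version B (the rewrite author's own statement) =====
-- stated objective: faster
-- what changed: B replaces A's quadratic loop (recompute total width, rescan for the longest label, list.remove, repeat) by one sort of the labels by removal priority ((len, label) descending, index ascending via stability), then drops labels from that order while subtracting each width incrementally until the remainder fits, finally emitting survivors in original order.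
import Mathlib
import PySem

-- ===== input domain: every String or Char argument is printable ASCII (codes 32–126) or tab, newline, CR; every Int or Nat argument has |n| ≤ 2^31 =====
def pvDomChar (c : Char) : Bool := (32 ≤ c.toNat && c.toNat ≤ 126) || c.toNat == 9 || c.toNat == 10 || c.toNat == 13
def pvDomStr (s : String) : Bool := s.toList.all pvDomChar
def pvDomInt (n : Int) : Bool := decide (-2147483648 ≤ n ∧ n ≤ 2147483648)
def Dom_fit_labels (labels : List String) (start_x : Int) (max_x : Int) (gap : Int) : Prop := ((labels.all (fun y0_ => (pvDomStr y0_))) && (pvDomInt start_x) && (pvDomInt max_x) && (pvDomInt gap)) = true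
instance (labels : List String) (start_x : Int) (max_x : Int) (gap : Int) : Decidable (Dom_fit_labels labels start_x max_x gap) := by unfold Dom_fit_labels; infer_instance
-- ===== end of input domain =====

-- B replaces A's quadratic remove-the-longest-and-rescan loop by one sort by removal
-- priority plus an incremental width subtraction (objective: faster, O(n log n) vs O(n^2)).

-- ===== PORT A =====
def pvLabelWidth (label : String) : Int := PySem.Str.len label * 7 + 12

-- termination fact for the while-loop port: list.remove shortens the list (cited by pvFitLoop)
theorem pvRemoveLen {α : Type} [BEq α] [LawfulBEq α] (xs : List α) (v : α) (r : List α)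
    (h : PySem.List.remove? xs v = some r) : r.length < xs.length := by
  have hv : v ∈ xs := by
    by_contra hv
    rw [← PySem.List.remove?_eq_none_iff xs v] at hv
    simp [hv] at h
  rw [PySem.List.remove?_eq_some_erase xs v hv] at h
  cases h
  have := List.length_erase_of_mem hv
  have : 0 < xs.length := List.length_pos_of_mem hv
  omega

def pvFitLoop (fitted : List String) (start_x : Int) (max_x : Int) (gap : Int) : List String :=
  if fitted.isEmpty then fitted
  else
    let total_width := (fitted.map pvLabelWidth).sum + gap * ((fitted.length : Int) - 1)
    if start_x + total_width ≤ max_x then fitted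
    else
      match PySem.List.max2? fitted (fun l => PySem.Str.len l) (fun l => l) with
      | none => fitted  -- unreachable: fitted is nonempty here
      | some longest =>
        match hr : PySem.List.remove? fitted longest with
        | none => fitted  -- unreachable: longest is a member of fitted
        | some rest => pvFitLoop rest start_x max_x gap
termination_by fitted.length
decreasing_by exact pvRemoveLen fitted longest rest hr

def fit_labels (labels : List String) (start_x : Int) (max_x : Int) (gap : Int) : List String :=
  pvFitLoop labels start_x max_x gap

-- ===== PORT B =====
-- the for-loop over `order` with its early break
def pvDropLoop (order : List (Int × String)) (start_x : Int) (max_x : Int) (gap : Int)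
    (total : Int) (dropped : PySem.Set Int) : PySem.Set Int :=
  match order with
  | [] => dropped
  | (i, l) :: rest =>
    if start_x + total ≤ max_x then dropped
    else pvDropLoop rest start_x max_x gap (total - (PySem.Str.len l * 7 + 12) - gap) (PySem.Set.add dropped i)

def fit_labels_alt (labels : List String) (start_x : Int) (max_x : Int) (gap : Int) : List String :=
  let order := PySem.List.sorted2 (PySem.List.enumerate labels) (fun p => PySem.Str.len p.2) (fun p => p.2) true
  let total := (labels.map (fun l => PySem.Str.len l * 7 + 12)).sum + gap * ((labels.length : Int) - 1)
  let dropped := pvDropLoop order start_x max_x gap total PySem.Set.empty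
  ((PySem.List.enumerate labels).filter (fun p => !(PySem.Set.contains dropped p.1))).map (fun p => p.2)

-- ===== PRECONDITION & SPEC =====
def Spec_fit_labels (labels : List String) (start_x : Int) (max_x : Int) (gap : Int) (out : List String) : Prop := out = fit_labels_alt labels start_x max_x gap
instance (labels : List String) (start_x : Int) (max_x : Int) (gap : Int) (out : List String) : Decidable (Spec_fit_labels labels start_x max_x gap out) := by unfold Spec_fit_labels; infer_instance

-- ===== CLAIM (what is proved, stated in full; the proofs are below) =====
def Claim_equal_fit_labels : Prop := ∀ (labels : List String) (start_x : Int) (max_x : Int) (gap : Int), Dom_fit_labels labels start_x max_x gap → Spec_fit_labels labels start_x max_x gap (fit_labels labels start_x max_x gap)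

-- ===== LEMMAS AND PROOFS =====

-- removal-priority key: (len, label) descending, index ascending — injective, linearly ordered
def pvK (p : Int × String) : Int ×ₗ (String ×ₗ Int) := toLex (PySem.Str.len p.2, toLex (p.2, -p.1))

-- A's total width of a remaining enumerated sublist
def pvW (gap : Int) (rem : List (Int × String)) : Int :=
  (rem.map (fun p => PySem.Str.len p.2 * 7 + 12)).sum + gap * ((rem.length : Int) - 1)

theorem pvInsertByCongr {α : Type} (b1 b2 : α → α → Bool) (x : α) :
    ∀ (ys : List α), (∀ y ∈ ys, b1 x y = b2 x y) →
    PySem.List.insertBy b1 x ys = PySem.List.insertBy b2 x ys := by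
  intro ys
  induction ys with
  | nil => intro _; rfl
  | cons y t ih =>
    intro h
    have hy := h y (by simp)
    simp only [PySem.List.insertBy, hy]
    by_cases hb : b2 x y
    · simp [hb]
    · simp [hb]
      exact ih (fun z hz => h z (by simp [hz]))

theorem pvFoldlInsertByCongr {α : Type} (b1 b2 : α → α → Bool) :
    ∀ (xs acc : List α), xs.Pairwise (fun y x => b1 x y = b2 x y) →
    (∀ x ∈ xs, ∀ y ∈ acc, b1 x y = b2 x y) →
    xs.foldl (fun a x => PySem.List.insertBy b1 x a) acc
      = xs.foldl (fun a x => PySem.List.insertBy b2 x a) acc := by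
  intro xs
  induction xs with
  | nil => intro _ _ _; rfl
  | cons x t ih =>
    intro acc hpw hacc
    simp only [List.foldl_cons]
    rw [pvInsertByCongr b1 b2 x acc (hacc x (by simp))]
    apply ih
    · exact hpw.of_cons
    · intro z hz y hy
      rcases (PySem.List.mem_insertBy _ _ _ _).mp hy with h | h
      · subst h
        exact (List.pairwise_cons.mp hpw).1 z hz
      · exact hacc z (by simp [hz]) y h

theorem pvCondTrue (m x : String) :
    (decide (PySem.Str.len m < PySem.Str.len x) ||
      (!decide (PySem.Str.len x < PySem.Str.len m) && decide (m < x))) = true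
    ↔ (PySem.Str.len m < PySem.Str.len x ∨ (¬ PySem.Str.len x < PySem.Str.len m ∧ m < x)) := by
  rw [Bool.or_eq_true, Bool.and_eq_true, Bool.not_eq_true', decide_eq_false_iff_not,
    decide_eq_true_eq, decide_eq_true_eq]

theorem pvKltIff (x y : Int × String) :
    pvK y < pvK x ↔ (PySem.Str.len y.2 < PySem.Str.len x.2 ∨
      (PySem.Str.len y.2 = PySem.Str.len x.2 ∧ (y.2 < x.2 ∨ (y.2 = x.2 ∧ x.1 < y.1)))) := by
  show toLex _ < toLex _ ↔ _
  rw [Prod.Lex.toLex_lt_toLex, Prod.Lex.toLex_lt_toLex, neg_lt_neg_iff]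

theorem pvBeforeEq (x y : Int × String) (h : y.1 < x.1) :
    (decide (PySem.Str.len y.2 < PySem.Str.len x.2) ||
      (!decide (PySem.Str.len x.2 < PySem.Str.len y.2) && decide (y.2 < x.2)))
    = decide (pvK y < pvK x) := by
  rw [Bool.eq_iff_iff, pvCondTrue, decide_eq_true_eq, pvKltIff]
  constructor
  · rintro (h1 | ⟨h1, h2⟩)
    · exact Or.inl h1
    · rcases lt_trichotomy (PySem.Str.len y.2) (PySem.Str.len x.2) with hl | hl | hl
      · exact Or.inl hl
      · exact Or.inr ⟨hl, Or.inl h2⟩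
      · exact absurd hl h1
  · rintro (h1 | ⟨h1, h2 | ⟨h2, _⟩⟩)
    · exact Or.inl h1
    · exact Or.inr ⟨by omega, h2⟩
    · omega

theorem pvSorted2EqSortedK (es : List (Int × String)) (hinc : es.Pairwise (fun a b => a.1 < b.1)) :
    PySem.List.sorted2 es (fun p => PySem.Str.len p.2) (fun p => p.2) true
      = PySem.List.sorted es pvK true := by
  rw [PySem.List.sorted_rev_eq_foldl_insertBy]
  show es.foldl (fun acc x => PySem.List.insertBy _ x acc) [] = _
  apply pvFoldlInsertByCongr
  · exact hinc.imp (fun {a b} hab => pvBeforeEq b a hab)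
  · intro _ _ y hy; cases hy

theorem pvKInj : Function.Injective pvK := by
  intro a b hab
  simp only [pvK] at hab
  have h1 := congrArg (fun q : Int ×ₗ (String ×ₗ Int) => (ofLex q).1) hab
  have h2 := congrArg (fun q : Int ×ₗ (String ×ₗ Int) => (ofLex (ofLex q).2).1) hab
  have h3 := congrArg (fun q : Int ×ₗ (String ×ₗ Int) => (ofLex (ofLex q).2).2) hab
  simp at h2 h3
  have : a.1 = b.1 := by omega
  exact Prod.ext this h2

theorem pvSortedKPairwise (es : List (Int × String)) (hinc : es.Pairwise (fun a b => a.1 < b.1)) :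
    (PySem.List.sorted es pvK true).Pairwise (fun a b => pvK b < pvK a) := by
  have hle := PySem.List.sorted_pairwise_rev es pvK
  have hnd : es.Nodup := by
    apply List.Pairwise.imp _ hinc
    intro a b hab
    intro hEq; subst hEq; omega
  have hnd' : (PySem.List.sorted es pvK true).Nodup :=
    ((PySem.List.sorted_perm es pvK true).nodup_iff).mpr hnd
  have := List.Pairwise.and hle hnd'
  apply List.Pairwise.imp _ this
  rintro a b ⟨h1, h2⟩
  exact lt_of_le_of_ne h1 (fun hEq => h2 (pvKInj hEq.symm))

-- max(fitted, key=lambda l: (len(l), l)) returns v when v is in the list and dominates every element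
theorem pvMax2Aux (v : String) :
    ∀ (l : List String) (m : String),
      (m = v ∨ (PySem.Str.len m < PySem.Str.len v ∨ (PySem.Str.len m = PySem.Str.len v ∧ m < v))) →
      (v ∈ l ∨ m = v) →
      (∀ y ∈ l, y = v ∨ (PySem.Str.len y < PySem.Str.len v ∨ (PySem.Str.len y = PySem.Str.len v ∧ y < v))) →
      PySem.List.max2? (m :: l) (fun s => PySem.Str.len s) (fun s => s) = some v := by
  intro l
  induction l with
  | nil =>
    intro m _ hv _
    rcases hv with hv | hv
    · cases hv
    · rw [hv]
      simp [PySem.List.max2?]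
  | cons x t ih =>
    intro m hm hv hall
    have hstep : PySem.List.max2? (m :: x :: t) (fun s => PySem.Str.len s) (fun s => s)
        = PySem.List.max2?
            ((if (decide (PySem.Str.len m < PySem.Str.len x) || !decide (PySem.Str.len x < PySem.Str.len m) && decide (m < x)) = true then x else m) :: t)
            (fun s => PySem.Str.len s) (fun s => s) := by
      by_cases hc : (decide (PySem.Str.len m < PySem.Str.len x) || !decide (PySem.Str.len x < PySem.Str.len m) && decide (m < x)) = true
      · rw [if_pos hc]
        simp only [PySem.List.max2?, List.foldl_cons, hc, reduceIte]
      · rw [if_neg hc]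
        have hc' : (decide (PySem.Str.len m < PySem.Str.len x) || !decide (PySem.Str.len x < PySem.Str.len m) && decide (m < x)) = false := by
          cases h : (decide (PySem.Str.len m < PySem.Str.len x) || !decide (PySem.Str.len x < PySem.Str.len m) && decide (m < x))
          · rfl
          · exact absurd h hc
        simp at hc'
        simp only [PySem.List.max2?, List.foldl_cons]
        have hneg : ¬(m.length < x.length ∨ m.length ≤ x.length ∧ m.toList < x.toList) := by
          rcases hc' with ⟨h1, h2⟩
          rintro (h3 | ⟨h3, h4⟩)
          · omega
          · exact absurd h4 (not_lt.mpr (h2 h3))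
        simp [hneg]
    rw [hstep]
    by_cases hc : (decide (PySem.Str.len m < PySem.Str.len x) || !decide (PySem.Str.len x < PySem.Str.len m) && decide (m < x)) = true
    · rw [if_pos hc]
      apply ih x (hall x (List.mem_cons.mpr (Or.inl rfl)))
        ?_ (fun y hy => hall y (List.mem_cons.mpr (Or.inr hy)))
      rcases hv with hv | hv
      · rcases List.mem_cons.mp hv with hxv | hvt
        · right; exact hxv.symm
        · left; exact hvt
      · subst hv
        rcases hall x (List.mem_cons.mpr (Or.inl rfl)) with hxv | hdomx
        · right; exact hxv
        · exfalso
          rcases pvCondTrue m x |>.mp hc with hcl | ⟨hcl, hcs⟩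
          · rcases hdomx with hd | ⟨hd, _⟩ <;> omega
          · rcases hdomx with hd | ⟨hd, hds⟩
            · omega
            · exact lt_asymm hcs hds
    · rw [if_neg hc]
      apply ih m hm ?_ (fun y hy => hall y (List.mem_cons.mpr (Or.inr hy)))
      rcases hv with hv | hv
      · rcases List.mem_cons.mp hv with hxv | hvt
        · rcases hm with hm2 | hdomm
          · right; exact hm2
          · exfalso
            apply hc
            apply (pvCondTrue m x).mpr
            rw [← hxv]
            rcases hdomm with hd | ⟨hd, hds⟩
            · exact Or.inl hd
            · exact Or.inr ⟨by omega, hds⟩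
        · left; exact hvt
      · right; exact hv

theorem pvMax2Spec (l : List String) (v : String) (hv : v ∈ l)
    (hall : ∀ y ∈ l, y = v ∨ (PySem.Str.len y < PySem.Str.len v ∨ (PySem.Str.len y = PySem.Str.len v ∧ y < v))) :
    PySem.List.max2? l (fun s => PySem.Str.len s) (fun s => s) = some v := by
  cases l with
  | nil => cases hv
  | cons x t =>
    apply pvMax2Aux v t x (hall x (List.mem_cons.mpr (Or.inl rfl)))
      ?_ (fun y hy => hall y (List.mem_cons.mpr (Or.inr hy)))
    rcases List.mem_cons.mp hv with hxv | hvt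
    · right; exact hxv.symm
    · left; exact hvt

-- removing the first occurrence of p.2 from the projected list = deleting the pair p
theorem pvRemoveFirst :
    ∀ (rem : List (Int × String)) (p : Int × String),
      rem.Pairwise (fun a b => a.1 < b.1) → p ∈ rem →
      (∀ q ∈ rem, q.2 = p.2 → p.1 ≤ q.1) →
      PySem.List.remove? (rem.map Prod.snd) p.2
        = some ((rem.filter (fun q => !(q.1 == p.1))).map Prod.snd) := by
  intro rem
  induction rem with
  | nil => intro p _ hp _; cases hp
  | cons r t ih =>
    intro p hpw hp hfirst
    by_cases hrp : r.1 = p.1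
    · -- head is p itself (indices are strictly increasing, so unique)
      have hrEq : r = p := by
        rcases List.mem_cons.mp hp with h | h
        · exact h.symm
        · exfalso
          have := (List.pairwise_cons.mp hpw).1 p h
          omega
      subst hrEq
      simp only [List.map_cons, PySem.List.remove?_cons_self]
      congr 1
      have : t.filter (fun q => !(q.1 == r.1)) = t := by
        apply List.filter_eq_self.mpr
        intro q hq
        have := (List.pairwise_cons.mp hpw).1 q hq
        simp; omega
      rw [List.filter_cons]
      simp [this]
    · have hpt : p ∈ t := by
        rcases List.mem_cons.mp hp with h | h
        · exact absurd (congrArg Prod.fst h.symm) hrp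
        · exact h
      have hrv : r.2 ≠ p.2 := by
        intro hEq
        have h1 := hfirst r (by simp) hEq
        have h2 := (List.pairwise_cons.mp hpw).1 p hpt
        omega
      simp only [List.map_cons]
      rw [PySem.List.remove?_cons_of_ne _ hrv]
      rw [ih p (List.pairwise_cons.mp hpw).2 hpt (fun q hq hq2 => hfirst q (by simp [hq]) hq2)]
      rw [List.filter_cons]
      have : (!(r.1 == p.1)) = true := by simp [hrp]
      simp [this]

-- deleting the pair p is, up to permutation, removing it from the front
theorem pvPermFilter :
    ∀ (rem : List (Int × String)) (p : Int × String),
      rem.Pairwise (fun a b => a.1 < b.1) → p ∈ rem →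
      rem.Perm (p :: rem.filter (fun q => !(q.1 == p.1))) := by
  intro rem
  induction rem with
  | nil => intro p _ hp; cases hp
  | cons r t ih =>
    intro p hpw hp
    by_cases hrp : r.1 = p.1
    · have hrEq : r = p := by
        rcases List.mem_cons.mp hp with h | h
        · exact h.symm
        · exfalso
          have := (List.pairwise_cons.mp hpw).1 p h
          omega
      subst hrEq
      rw [List.filter_cons]
      have ht : t.filter (fun q => !(q.1 == r.1)) = t := by
        apply List.filter_eq_self.mpr
        intro q hq
        have := (List.pairwise_cons.mp hpw).1 q hq
        simp; omega
      simp [ht]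
    · have hpt : p ∈ t := by
        rcases List.mem_cons.mp hp with h | h
        · exact absurd (congrArg Prod.fst h.symm) hrp
        · exact h
      rw [List.filter_cons]
      have : (!(r.1 == p.1)) = true := by simp [hrp]
      simp only [this, if_pos]
      exact ((ih p (List.pairwise_cons.mp hpw).2 hpt).cons r).trans (List.Perm.swap p r _)

-- adding one index to the dropped set composes the filters
theorem pvFilterAdd (es : List (Int × String)) (dropped : PySem.Set Int) (i : Int) :
    es.filter (fun p => !(PySem.Set.contains (PySem.Set.add dropped i) p.1))
      = (es.filter (fun p => !(PySem.Set.contains dropped p.1))).filter (fun q => !(q.1 == i)) := by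
  rw [List.filter_filter]
  apply List.filter_congr
  intro p _
  by_cases h1 : p.1 ∈ dropped <;> by_cases h2 : p.1 = i <;>
    simp [PySem.Set.mem_add, h1, h2]

-- the main loop correspondence
theorem pvMain (start_x max_x gap : Int) (es : List (Int × String))
    (hinc : es.Pairwise (fun a b => a.1 < b.1)) :
    ∀ (suffix : List (Int × String)) (total : Int) (dropped : PySem.Set Int),
      suffix.Perm (es.filter (fun p => !(PySem.Set.contains dropped p.1))) →
      suffix.Pairwise (fun a b => pvK b < pvK a) →
      total = pvW gap (es.filter (fun p => !(PySem.Set.contains dropped p.1))) →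
      pvFitLoop ((es.filter (fun p => !(PySem.Set.contains dropped p.1))).map Prod.snd) start_x max_x gap
        = (es.filter (fun p => !(PySem.Set.contains (pvDropLoop suffix start_x max_x gap total dropped) p.1))).map Prod.snd := by
  intro suffix
  induction suffix with
  | nil =>
    intro total dropped hperm _ _
    have hnil : es.filter (fun p => !(PySem.Set.contains dropped p.1)) = [] :=
      hperm.symm.eq_nil
    rw [hnil]
    rw [pvFitLoop]
    simp only [pvDropLoop, List.isEmpty_nil, if_pos, hnil, List.map_nil]
  | cons p restS ih =>
    intro total dropped hperm hpw htotal
    obtain ⟨i, l⟩ := p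
    set rem := es.filter (fun p => !(PySem.Set.contains dropped p.1)) with hrem
    have hmemP : (i, l) ∈ rem := hperm.mem_iff.mp (by simp)
    have hremne : rem ≠ [] := by
      intro h; rw [h] at hmemP; cases hmemP
    have hremPW : rem.Pairwise (fun a b => a.1 < b.1) :=
      hinc.sublist List.filter_sublist
    -- elements of rem are the head or dominated by it
    have hdom : ∀ q ∈ rem, q = (i, l) ∨ pvK q < pvK (i, l) := by
      intro q hq
      have : q ∈ (i, l) :: restS := hperm.mem_iff.mpr hq
      rcases List.mem_cons.mp this with h | h
      · left; exact h
      · right; exact (List.pairwise_cons.mp hpw).1 q h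
    rw [pvFitLoop]
    have hne' : ¬ ((rem.map Prod.snd).isEmpty = true) := by
      simp only [List.isEmpty_iff, List.map_eq_nil_iff]
      exact hremne
    rw [if_neg hne']
    have htw : ((rem.map Prod.snd).map pvLabelWidth).sum + gap * (((rem.map Prod.snd).length : Int) - 1) = total := by
      rw [htotal]
      simp only [pvW, List.map_map, List.length_map, Function.comp_def, pvLabelWidth]
    rw [htw]
    by_cases hfit : start_x + total ≤ max_x
    · rw [if_pos hfit]
      simp only [pvDropLoop]
      rw [if_pos hfit]
    · rw [if_neg hfit]
      -- the head of the sorted suffix is exactly the label A's max picks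
      have hmax : PySem.List.max2? (rem.map Prod.snd) (fun s => PySem.Str.len s) (fun s => s) = some l := by
        apply pvMax2Spec
        · exact List.mem_map.mpr ⟨(i, l), hmemP, rfl⟩
        · intro y hy
          obtain ⟨q, hq, hqy⟩ := List.mem_map.mp hy
          rcases hdom q hq with h | h
          · left; rw [← hqy, h]
          · have hk : PySem.Str.len q.2 < PySem.Str.len l ∨
                (PySem.Str.len q.2 = PySem.Str.len l ∧ (q.2 < l ∨ (q.2 = l ∧ i < q.1))) :=
              (pvKltIff (i, l) q).mp h
            rcases hk with h1 | ⟨h1, h2 | ⟨h2, _⟩⟩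
            · right; left; rw [← hqy]; exact h1
            · right; right; rw [← hqy]; exact ⟨h1, h2⟩
            · left; rw [← hqy]; exact h2
      have hfirst : ∀ q ∈ rem, q.2 = l → i ≤ q.1 := by
        intro q hq hq2
        rcases hdom q hq with h | h
        · rw [h]
        · have hk : PySem.Str.len q.2 < PySem.Str.len l ∨
              (PySem.Str.len q.2 = PySem.Str.len l ∧ (q.2 < l ∨ (q.2 = l ∧ i < q.1))) :=
            (pvKltIff (i, l) q).mp h
          rcases hk with h1 | ⟨h1, h2 | ⟨h2, h3⟩⟩
          · rw [hq2] at h1; omega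
          · rw [hq2] at h2; exact absurd h2 (lt_irrefl _)
          · omega
      have hremove : PySem.List.remove? (rem.map Prod.snd) l
          = some ((rem.filter (fun q => !(q.1 == i))).map Prod.snd) :=
        pvRemoveFirst rem (i, l) hremPW hmemP hfirst
      rw [hmax]
      -- the new remaining list
      have hperm3 : rem.Perm ((i, l) :: rem.filter (fun q => !(q.1 == i))) :=
        pvPermFilter rem (i, l) hremPW hmemP
      have hfilter := pvFilterAdd es dropped i
      have hnewtotal : total - (PySem.Str.len l * 7 + 12) - gap
          = pvW gap (es.filter (fun p => !(PySem.Set.contains (PySem.Set.add dropped i) p.1))) := by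
        rw [hfilter, ← hrem, htotal]
        have hsum : (rem.map (fun p => PySem.Str.len p.2 * 7 + 12)).sum
            = PySem.Str.len l * 7 + 12 + ((rem.filter (fun q => !(q.1 == i))).map (fun p => PySem.Str.len p.2 * 7 + 12)).sum := by
          have := (hperm3.map (fun p => PySem.Str.len p.2 * 7 + 12)).sum_eq
          simpa using this
        have hlen : (rem.length : Int) = ((rem.filter (fun q => !(q.1 == i))).length : Int) + 1 := by
          have := hperm3.length_eq
          simp at this
          omega
        simp only [pvW, hsum, hlen]
        ring
      have hpermNew : restS.Perm (es.filter (fun p => !(PySem.Set.contains (PySem.Set.add dropped i) p.1))) := by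
        rw [hfilter, ← hrem]
        exact (hperm.trans hperm3).cons_inv
      have hih := ih (total - (PySem.Str.len l * 7 + 12) - gap) (PySem.Set.add dropped i)
        hpermNew hpw.of_cons hnewtotal
      rw [hfilter, ← hrem] at hih
      have hdl : pvDropLoop ((i, l) :: restS) start_x max_x gap total dropped
          = pvDropLoop restS start_x max_x gap (total - (PySem.Str.len l * 7 + 12) - gap) (PySem.Set.add dropped i) := by
        simp only [pvDropLoop]
        rw [if_neg hfit]
      rw [hdl]
      split
      · rename_i heq
        cases heq
      · rename_i longest heq
        cases heq
        split
        · rename_i heq2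
          rw [hremove] at heq2
          cases heq2
        · rename_i rest heq2
          rw [hremove] at heq2
          cases heq2
          exact hih

-- ===== VERDICT (by name: the statement is the Claim_ definition above) =====
theorem fit_labels_spec : Claim_equal_fit_labels := by
  intro labels start_x max_x gap _
  unfold Spec_fit_labels fit_labels fit_labels_alt
  set es := PySem.List.enumerate labels with hes
  have hinc : es.Pairwise (fun a b => a.1 < b.1) := PySem.List.pairwise_lt_enumerate labels 0
  have hfilter0 : es.filter (fun p => !(PySem.Set.contains PySem.Set.empty p.1)) = es := by
    apply List.filter_eq_self.mpr
    intro p _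
    rfl
  have hsnd : es.map Prod.snd = labels := PySem.List.map_snd_enumerate labels 0
  have htotal : (labels.map (fun l => PySem.Str.len l * 7 + 12)).sum + gap * ((labels.length : Int) - 1)
      = pvW gap es := by
    simp only [← hsnd, List.map_map, List.length_map, pvW, Function.comp_def]
  have hsorted := pvSorted2EqSortedK es hinc
  have hmain := pvMain start_x max_x gap es hinc
    (PySem.List.sorted es pvK true)
    ((labels.map (fun l => PySem.Str.len l * 7 + 12)).sum + gap * ((labels.length : Int) - 1))
    PySem.Set.empty
    (by rw [hfilter0]; exact PySem.List.sorted_perm es pvK true)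
    (pvSortedKPairwise es hinc)
    (by rw [hfilter0]; exact htotal)
  rw [hfilter0, hsnd] at hmain
  rw [hsorted]
  exact hmain
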